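-- pv_equiv track=rewrite | github.com/alexandraback/datacollection | solutions_5636311922769920_1/Python/hwmaltby/fractiles.py | fractile
-- ===== SOURCE A (Python) =====
-- def fractile(K, C, S):
--     """
--     Takes three integers as input, solves the problem.
--     Does so by attempting to create a particular solution, the existence of
--     which is necessary for there to be any solution. Notes that the K-ary
--     representation of the placement of a block gives information about the
--     type of block in the original sequence with placement at each of its
--     digits (0-indexing).
--     """
--     if S * C < K:
--         return "IMPOSSIBLE"
--
--     lst = []
--     i = 0
--     while i < K:
--         lst.append(str(k_ary(i, K, C) + 1)) #add 1 to undo 0-indexint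
--         i += C
--     return " ".join(lst)
--
-- def k_ary(n, k, c):
--     """
--     .
--     """
--     if c == 1 or n == k - 1:
--         return n
--     return n + k * k_ary(n + 1, k, c - 1)
-- ===== SOURCE B (Python) =====
-- def fractile(K, C, S):
--     if S * C < K:
--         return "IMPOSSIBLE"
--     parts = []
--     i = 0
--     while i < K:
--         # closed form: the block at i has K-ary digits i, i+1, ... for
--         # min(C, K - i) levels, so its 0-indexed placement is sum (i+j)*K^j
--         levels = min(C, K - i)
--         val = 0
--         p = 1
--         for j in range(levels):
--             val += (i + j) * p
--             p *= K
--         parts.append(str(val + 1))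
--         i += C
--     return " ".join(parts)
-- ===== Notes on version B (the rewrite author's own statement) =====
-- stated objective: alternative
-- what changed: Replaces the linear recursive helper k_ary with a closed-form digit sum: each block's placement is computed directly as sum of (i+j)*K^j over min(C, K-i) levels using a running-power accumulator loop instead of recursion.
import Mathlib
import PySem

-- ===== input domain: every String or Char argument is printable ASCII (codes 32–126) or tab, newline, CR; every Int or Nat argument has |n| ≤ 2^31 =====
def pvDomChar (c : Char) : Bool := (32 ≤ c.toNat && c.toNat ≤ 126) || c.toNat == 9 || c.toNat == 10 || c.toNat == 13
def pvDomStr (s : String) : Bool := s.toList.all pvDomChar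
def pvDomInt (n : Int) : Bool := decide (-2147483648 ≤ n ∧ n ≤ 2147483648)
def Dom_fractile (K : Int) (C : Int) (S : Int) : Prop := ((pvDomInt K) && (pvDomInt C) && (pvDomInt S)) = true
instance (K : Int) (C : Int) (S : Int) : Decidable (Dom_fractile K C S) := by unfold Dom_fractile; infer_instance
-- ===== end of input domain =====

-- B replaces the linear recursion k_ary by a closed-form digit sum Σ (i+j)·K^j over min(C, K-i)
-- levels, accumulated with a running power; return-value equivalence on Pre_.

-- ===== PORT A =====
-- k_ary from A, with a fuel argument for totality; fuel is exhausted only where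
-- Python's recursion would not terminate (never reached by fractile's calls inside Pre_).
def kAry : Nat → Int → Int → Int → Int
  | 0, _, _, _ => 0
  | f+1, n, k, c => if c = 1 ∨ n = k - 1 then n else n + k * kAry f (n+1) k (c-1)

-- the 'while i < K' loop of A, fueled (the fuel is exhausted only when the Python loop diverges)
def loopA (K C : Int) : Nat → Int → List String → List String
  | 0, _, acc => acc
  | f+1, i, acc =>
    if i < K then loopA K C f (i + C) (acc ++ [PySem.Int.toStr (kAry (C.toNat + K.toNat + 1) i K C + 1)])
    else acc

def fractile (K : Int) (C : Int) (S : Int) : String :=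
  if S * C < K then "IMPOSSIBLE"
  else PySem.Str.join " " (loopA K C (K.toNat + 1) 0 [])

-- ===== PORT B =====
-- inner 'for j in range(levels): val += (i+j)*p; p *= K' of B
def digitSum (K i levels : Int) : Int × Int :=
  (PySem.List.pyRange 0 levels 1).foldl (fun s j => (s.1 + (i + j) * s.2, s.2 * K)) (0, 1)

-- the 'while i < K' loop of B, fueled exactly like A's (same divergence region)
def loopB (K C : Int) : Nat → Int → List String → List String
  | 0, _, acc => acc
  | f+1, i, acc =>
    if i < K then
      loopB K C f (i + C) (acc ++ [PySem.Int.toStr ((digitSum K i (min C (K - i))).1 + 1)])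
    else acc

def fractile_alt (K : Int) (C : Int) (S : Int) : String :=
  if S * C < K then "IMPOSSIBLE"
  else PySem.Str.join " " (loopB K C (K.toNat + 1) 0 [])

-- ===== PRECONDITION & SPEC =====
-- Pre_ excludes exactly the inputs where A's while-loop diverges (K > 0, C ≤ 0, S*C ≥ K): A never returns there.
def Pre_fractile (K : Int) (C : Int) (S : Int) : Prop := S * C < K ∨ K ≤ 0 ∨ 1 ≤ C
instance (K : Int) (C : Int) (S : Int) : Decidable (Pre_fractile K C S) := by unfold Pre_fractile; infer_instance
def pvWitness_fractile : Int × Int × Int := (6, 2, 3)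

def Spec_fractile (K : Int) (C : Int) (S : Int) (out : String) : Prop := out = fractile_alt K C S
instance (K : Int) (C : Int) (S : Int) (out : String) : Decidable (Spec_fractile K C S out) := by unfold Spec_fractile; infer_instance

-- ===== CLAIM =====
def Claim_equal_fractile : Prop := ∀ (K : Int) (C : Int) (S : Int), Dom_fractile K C S → Pre_fractile K C S → Spec_fractile K C S (fractile K C S)

-- ===== LEMMAS AND PROOFS =====

-- abstract digit sum, peeled from the front like k_ary's recursion
def sumPow (i K : Int) : Nat → Int
  | 0 => 0
  | L+1 => i + K * sumPow (i+1) K L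

-- back-peel form of sumPow
theorem sumPow_succ_right : ∀ (L : Nat) (i K : Int),
    sumPow i K (L+1) = sumPow i K L + (i + L) * K ^ L := by
  intro L
  induction L with
  | zero => intro i K; simp [sumPow]
  | succ L ih =>
    intro i K
    show i + K * sumPow (i+1) K (L+1) = (i + K * sumPow (i+1) K L) + (i + (L+1 : Nat)) * K ^ (L+1)
    rw [ih (i+1) K]
    push_cast
    ring

-- the running-power fold computes (sumPow, K^L)
theorem digitSum_eq (K i : Int) : ∀ (L : Nat),
    digitSum K i (L : Int) = (sumPow i K L, K ^ L) := by
  intro L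
  induction L with
  | zero => simp [digitSum, PySem.List.pyRange_one_eq_nil, sumPow]
  | succ L ih =>
    unfold digitSum at ih ⊢
    have h : ((L : Int) + 1) = ((L + 1 : Nat) : Int) := by push_cast; ring
    rw [show ((L + 1 : Nat) : Int) = (L : Int) + 1 by push_cast; ring,
        PySem.List.pyRange_one_succ_right (by positivity), List.foldl_append, ih]
    simp [sumPow_succ_right, pow_succ]

-- k_ary equals the closed-form digit sum, for 1 ≤ c, n < k and sufficient fuel
theorem kAry_eq : ∀ (f : Nat) (n k c : Int), 1 ≤ c → n < k → c.toNat ≤ f →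
    kAry f n k c = sumPow n k (min c (k - n)).toNat := by
  intro f
  induction f with
  | zero => intro n k c hc _ hf; omega
  | succ f ih =>
    intro n k c hc hn hf
    by_cases h : c = 1 ∨ n = k - 1
    · have hL : (min c (k - n)).toNat = 1 := by omega
      simp [kAry, h, hL, sumPow]
    · push Not at h
      have hL : (min c (k - n)).toNat = (min (c-1) (k - (n+1))).toNat + 1 := by omega
      simp only [kAry]
      rw [if_neg (not_or.mpr ⟨h.1, h.2⟩), ih (n+1) k (c-1) (by omega) (by omega) (by omega), hL]
      rfl

theorem loop_eq (K C : Int) (hC : 1 ≤ C) : ∀ (f : Nat) (i : Int) (acc : List String),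
    loopA K C f i acc = loopB K C f i acc := by
  intro f
  induction f with
  | zero => intro i acc; rfl
  | succ f ih =>
    intro i acc
    simp only [loopA, loopB]
    by_cases h : i < K
    · simp only [if_pos h]
      rw [ih]
      have hmin : min C (K - i) = ((min C (K - i)).toNat : Int) := by omega
      rw [hmin, digitSum_eq,
          kAry_eq (C.toNat + K.toNat + 1) i K C hC h (by omega)]
    · simp [h]

-- ===== VERDICT =====
theorem fractile_spec : Claim_equal_fractile := by
  intro K C S _ hpre
  unfold Spec_fractile fractile fractile_alt
  by_cases hs : S * C < K
  · simp [hs]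
  · simp only [if_neg hs]
    rcases hpre with h | h | h
    · exact absurd h hs
    · have hK : ¬ (0 : Int) < K := by omega
      simp [loopA, loopB, hK]
    · rw [loop_eq K C h]
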